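-- pv_equiv track=rewrite | github.com/Enarb1/SoftUni_Python | Fundamentals/06.List Exercise/More Exercises/06.list_manipulator_var2.py | last_count_even
-- ===== SOURCE A (Python) =====
-- def last_count_even(first_list,num_count):
--     last_even = []
--     for num in first_list:
--         if int(num) % 2 == 0:
--             last_even.append(num)
--             if len(last_even) > num_count:
--                 last_even.pop(0)
--     return list(map(int, last_even))
-- ===== SOURCE B (Python) =====
-- def last_count_even(first_list, num_count):
--     result = []
--     for num in reversed(first_list):
--         if len(result) >= num_count:
--             break
--         if int(num) % 2 == 0:
--             result.append(num)
--     result.reverse()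
--     return list(map(int, result))
-- ===== Notes on version B (the rewrite author's own statement) =====
-- stated objective: alternative
-- what changed: B scans the list backwards and stops as soon as num_count evens are collected, then reverses, instead of A's forward pass that appends every even and pops the front of the sliding window.
import Mathlib
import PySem

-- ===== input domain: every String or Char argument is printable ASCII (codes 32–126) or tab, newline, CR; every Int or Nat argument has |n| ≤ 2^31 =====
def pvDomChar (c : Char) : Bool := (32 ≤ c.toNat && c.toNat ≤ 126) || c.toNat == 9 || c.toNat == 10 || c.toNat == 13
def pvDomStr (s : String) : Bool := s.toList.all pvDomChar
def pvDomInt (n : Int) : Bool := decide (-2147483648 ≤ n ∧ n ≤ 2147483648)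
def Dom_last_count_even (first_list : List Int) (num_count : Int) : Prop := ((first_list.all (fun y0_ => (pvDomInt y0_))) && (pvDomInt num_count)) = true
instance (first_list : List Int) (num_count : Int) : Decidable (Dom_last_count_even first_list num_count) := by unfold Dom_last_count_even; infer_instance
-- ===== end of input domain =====

-- B keeps the same return value by a backwards scan with early stop; A's forward pass keeps a sliding window with pop(0).

-- ===== PORT A =====
-- one loop iteration of A: append the even number, pop the front if the window exceeds num_count
-- (acc.drop 1 = pop(0); exact here because acc is nonempty when the branch is taken)
def lcStepA (num_count : Int) (acc : List Int) (num : Int) : List Int :=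
  if PySem.Int.mod num 2 == 0 then
    let acc2 := acc ++ [num]
    if num_count < (acc2.length : Int) then acc2.drop 1 else acc2
  else acc

def last_count_even (first_list : List Int) (num_count : Int) : List Int :=
  first_list.foldl (lcStepA num_count) []

-- ===== PORT B =====
-- B's loop over reversed(first_list): break once len(result) >= num_count, else append evens
def lcGoB (num_count : Int) (acc : List Int) : List Int → List Int
  | [] => acc
  | x :: xs =>
    if num_count ≤ (acc.length : Int) then acc
    else if PySem.Int.mod x 2 == 0 then lcGoB num_count (acc ++ [x]) xs
    else lcGoB num_count acc xs

def last_count_even_alt (first_list : List Int) (num_count : Int) : List Int :=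
  (lcGoB num_count [] first_list.reverse).reverse

-- ===== PRECONDITION & SPEC =====
def Spec_last_count_even (first_list : List Int) (num_count : Int) (out : List Int) : Prop := out = last_count_even_alt first_list num_count
instance (first_list : List Int) (num_count : Int) (out : List Int) : Decidable (Spec_last_count_even first_list num_count out) := by unfold Spec_last_count_even; infer_instance

-- ===== CLAIM (what is proved, stated in full; the proofs are below) =====
def Claim_equal_last_count_even : Prop := ∀ (first_list : List Int) (num_count : Int), Dom_last_count_even first_list num_count → Spec_last_count_even first_list num_count (last_count_even first_list num_count)

-- ===== LEMMAS AND PROOFS =====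

-- canonical value both sides reach: the last k elements of l
def pvTakeLast (l : List Int) (k : Nat) : List Int := (l.reverse.take k).reverse

-- dropping the front of l does not change the last k elements, as long as ≥ k remain
lemma pvTakeLast_drop_one (l r : List Int) (k : Nat) (h : k ≤ l.length - 1) :
    pvTakeLast (l.drop 1 ++ r) k = pvTakeLast (l ++ r) k := by
  unfold pvTakeLast
  by_cases hk : k ≤ r.length
  · simp [List.take_append_of_le_length, hk]
  · have h1 : (l.drop 1).reverse = l.reverse.take (l.length - 1) := by
      rw [List.reverse_drop]
    rw [List.reverse_append, List.reverse_append,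
        List.take_append, List.take_append, h1, List.take_take]
    have hmin : min (k - r.length) (l.length - 1) = k - r.length := by omega
    simp only [List.length_reverse]
    rw [hmin]

lemma lcFoldA_eq (num_count : Int) (xs : List Int) :
    ∀ (s : List Int), s.length ≤ num_count.toNat →
      xs.foldl (lcStepA num_count) s
        = pvTakeLast (s ++ xs.filter (fun x => PySem.Int.mod x 2 == 0)) num_count.toNat := by
  induction xs with
  | nil =>
    intro s hs
    unfold pvTakeLast
    simp only [List.filter_nil, List.append_nil, List.foldl_nil]
    rw [List.take_of_length_le (by simpa using hs)]
    simp
  | cons x xs ih =>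
    intro s hs
    simp only [List.foldl_cons, List.filter_cons]
    by_cases hx : (PySem.Int.mod x 2 == 0) = true
    · simp only [lcStepA, hx, if_pos]
      by_cases hlen : num_count < ((s ++ [x]).length : Int)
      · rw [if_pos hlen]
        have hlen' : (s ++ [x]).length = s.length + 1 := by simp
        have hdlen : ((s ++ [x]).drop 1).length ≤ num_count.toNat := by
          simp only [List.length_drop, hlen']
          omega
        rw [ih _ hdlen]
        have : num_count.toNat ≤ (s ++ [x]).length - 1 := by
          simp only [hlen']
          omega
        rw [pvTakeLast_drop_one _ _ _ this]
        simp
      · rw [if_neg hlen]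
        have : (s ++ [x]).length ≤ num_count.toNat := by
          simp only [List.length_append, List.length_cons, List.length_nil] at *
          omega
        rw [ih _ this]
        simp
    · simp only [lcStepA, hx, if_neg, Bool.false_eq_true, not_false_eq_true]
      rw [ih _ hs]

lemma lcGoB_eq (num_count : Int) (l : List Int) :
    ∀ (acc : List Int),
      lcGoB num_count acc l
        = acc ++ (l.filter (fun x => PySem.Int.mod x 2 == 0)).take (num_count.toNat - acc.length) := by
  induction l with
  | nil => intro acc; simp [lcGoB]
  | cons x xs ih =>
    intro acc
    simp only [lcGoB, List.filter_cons]
    by_cases hstop : num_count ≤ (acc.length : Int)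
    · rw [if_pos hstop]
      have : num_count.toNat - acc.length = 0 := by omega
      rw [this]
      simp
    · rw [if_neg hstop]
      have hge : num_count.toNat - acc.length = (num_count.toNat - (acc.length + 1)) + 1 := by
        omega
      by_cases hx : (PySem.Int.mod x 2 == 0) = true
      · simp only [hx, if_pos]
        rw [ih]
        simp only [List.length_append, List.length_cons, List.length_nil]
        rw [hge, List.take_succ_cons]
        simp
      · simp only [hx, Bool.false_eq_true, not_false_eq_true, if_neg]
        rw [ih]

-- B's result in canonical form
lemma alt_eq (first_list : List Int) (num_count : Int) :
    last_count_even_alt first_list num_count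
      = pvTakeLast (first_list.filter (fun x => PySem.Int.mod x 2 == 0)) num_count.toNat := by
  unfold last_count_even_alt pvTakeLast
  rw [lcGoB_eq]
  simp [List.filter_reverse]

-- ===== VERDICT (by name: the statement is the Claim_ definition above) =====
theorem last_count_even_spec : Claim_equal_last_count_even := by
  intro first_list num_count _
  unfold Spec_last_count_even last_count_even
  rw [alt_eq, lcFoldA_eq num_count first_list [] (by simp)]
  simp
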